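-- pv_equiv track=rewrite | github.com/Marcu21/UBB-INFO | An 1/Semestrul 1/Fundamentele Programarii/Lab 3/pythonLab3/main.py | secventa_maxima_interval_0_10
-- ===== SOURCE A (Python) =====
-- def  secventa_maxima_interval_0_10(lista: int,dimensiune_lista: int):
--     lista_secventa_maxima = []
--     lista_secventa_curenta = []
--     secventa_curenta = 0
--     secventa_maxima = -1
--
--
--     for i in range(dimensiune_lista):
--         if lista[i]>=0 and lista[i]<=10:
--             lista_secventa_curenta.append(lista[i])
--             secventa_curenta += 1
--             if secventa_curenta > secventa_maxima:
--                 lista_secventa_maxima.clear()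
--                 lista_secventa_maxima = lista_secventa_curenta [:]
--                 secventa_maxima = secventa_curenta
--
--         else:
--             secventa_curenta=0
--             lista_secventa_curenta.clear()
--
--     return lista_secventa_maxima
-- ===== SOURCE B (Python) =====
-- def secventa_maxima_interval_0_10(lista, dimensiune_lista):
--     # Single pass tracking best run (start, length); one slice at the end.
--     best_start = 0
--     best_len = 0
--     cur_start = 0
--     for i in range(dimensiune_lista):
--         if 0 <= lista[i] <= 10:
--             if i - cur_start + 1 > best_len:
--                 best_start = cur_start
--                 best_len = i - cur_start + 1
--         else:
--             cur_start = i + 1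
--     return lista[best_start:best_start + best_len]
-- ===== Notes on version B (the rewrite author's own statement) =====
-- stated objective: alternative
-- what changed: B replaces A's repeated list building and full-run copies (lista_secventa_curenta[:] on every extension) by a single pass that only tracks the best run's start index and length as integers, slicing the original list once at the end.
import Mathlib
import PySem

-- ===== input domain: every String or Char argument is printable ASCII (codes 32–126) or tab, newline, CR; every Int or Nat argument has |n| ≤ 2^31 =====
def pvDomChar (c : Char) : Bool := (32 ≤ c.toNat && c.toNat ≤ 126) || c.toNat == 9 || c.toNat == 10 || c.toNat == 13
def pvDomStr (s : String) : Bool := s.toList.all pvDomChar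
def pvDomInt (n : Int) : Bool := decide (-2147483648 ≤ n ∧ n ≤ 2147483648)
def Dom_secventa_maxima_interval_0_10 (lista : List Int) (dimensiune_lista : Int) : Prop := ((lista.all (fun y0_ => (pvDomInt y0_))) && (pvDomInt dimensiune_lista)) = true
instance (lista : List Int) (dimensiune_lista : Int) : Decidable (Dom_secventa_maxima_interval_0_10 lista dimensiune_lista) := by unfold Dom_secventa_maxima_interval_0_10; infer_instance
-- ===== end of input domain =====

-- B tracks only the best run's start/length in a single pass and slices the original list once at the end, instead of A's building and copying of run lists.


-- ===== PORT A =====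
-- loop body of A: state = (lista_secventa_maxima, lista_secventa_curenta, secventa_curenta, secventa_maxima)
def pvStepA (lista : List Int) (st : List Int × List Int × Int × Int) (i : Int) :
    List Int × List Int × Int × Int :=
  match st with
  | (maxL, curL, cur, mx) =>
    -- lista[i]: IndexError is excluded by Pre_, under which pyGetD is exact
    let v := PySem.List.pyGetD lista i 0
    if 0 ≤ v ∧ v ≤ 10 then
      let curL' := curL ++ [v]
      let cur' := cur + 1
      if cur' > mx then (curL', curL', cur', cur') else (maxL, curL', cur', mx)
    else (maxL, [], 0, mx)

def secventa_maxima_interval_0_10 (lista : List Int) (dimensiune_lista : Int) : List Int :=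
  ((PySem.List.pyRange 0 dimensiune_lista 1).foldl (pvStepA lista) ([], [], 0, -1)).1

-- ===== PORT B =====
-- loop body of B: state = (best_start, best_len, cur_start)
def pvStepB (lista : List Int) (st : Int × Int × Int) (i : Int) : Int × Int × Int :=
  match st with
  | (bs, bl, cs) =>
    let v := PySem.List.pyGetD lista i 0
    if 0 ≤ v ∧ v ≤ 10 then
      if i - cs + 1 > bl then (cs, i - cs + 1, cs) else (bs, bl, cs)
    else (bs, bl, i + 1)

def secventa_maxima_interval_0_10_alt (lista : List Int) (dimensiune_lista : Int) : List Int :=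
  let st := (PySem.List.pyRange 0 dimensiune_lista 1).foldl (pvStepB lista) (0, 0, 0)
  PySem.List.slice lista (some st.1) (some (st.1 + st.2.1))

-- ===== PRECONDITION & SPEC =====
-- A indexes lista[i] for i in range(dimensiune_lista): it raises IndexError iff dimensiune_lista > len(lista).
def Pre_secventa_maxima_interval_0_10 (lista : List Int) (dimensiune_lista : Int) : Prop :=
  dimensiune_lista ≤ (lista.length : Int)
instance (lista : List Int) (dimensiune_lista : Int) : Decidable (Pre_secventa_maxima_interval_0_10 lista dimensiune_lista) := by unfold Pre_secventa_maxima_interval_0_10; infer_instance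
def pvWitness_secventa_maxima_interval_0_10 : List Int × Int := ([3, -5, 7, 8, 11, 2], 6)

def Spec_secventa_maxima_interval_0_10 (lista : List Int) (dimensiune_lista : Int) (out : List Int) : Prop := out = secventa_maxima_interval_0_10_alt lista dimensiune_lista
instance (lista : List Int) (dimensiune_lista : Int) (out : List Int) : Decidable (Spec_secventa_maxima_interval_0_10 lista dimensiune_lista out) := by unfold Spec_secventa_maxima_interval_0_10; infer_instance

-- ===== CLAIM (what is proved, stated in full; the proofs are below) =====
def Claim_equal_secventa_maxima_interval_0_10 : Prop := ∀ (lista : List Int) (dimensiune_lista : Int), Dom_secventa_maxima_interval_0_10 lista dimensiune_lista → Pre_secventa_maxima_interval_0_10 lista dimensiune_lista → Spec_secventa_maxima_interval_0_10 lista dimensiune_lista (secventa_maxima_interval_0_10 lista dimensiune_lista)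

-- ===== LEMMAS AND PROOFS =====

lemma pvTake_drop_succ (l : List Int) (c n : Nat) (hc : c ≤ n) (hn : n < l.length) :
    (l.drop c).take (n + 1 - c) = (l.drop c).take (n - c) ++ [l[n]] := by
  have h1 : n + 1 - c = (n - c) + 1 := by omega
  rw [h1, List.take_add_one]
  have h2 : (l.drop c)[n - c]? = some l[n] := by
    rw [List.getElem?_drop]
    have h3 : c + (n - c) = n := by omega
    rw [h3, List.getElem?_eq_getElem hn]
  simp [h2]

lemma pvLoop_inv (lista : List Int) (n : Nat) (h : n ≤ lista.length) :
    ∃ bs bl cs : Nat,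
      (List.range n).foldl (fun st (k : Nat) => pvStepB lista st (k : Int)) (0, 0, 0)
        = ((bs : Int), (bl : Int), (cs : Int)) ∧
      bs + bl ≤ n ∧ cs ≤ n ∧
      (List.range n).foldl (fun st (k : Nat) => pvStepA lista st (k : Int)) ([], [], 0, -1)
        = ((lista.drop bs).take bl, (lista.drop cs).take (n - cs), (n : Int) - (cs : Int),
           if bl = 0 then (-1 : Int) else (bl : Int)) := by
  induction n with
  | zero => exact ⟨0, 0, 0, by simp, by omega, by omega, by simp⟩
  | succ n ih =>
    obtain ⟨bs, bl, cs, hB, hbnd, hcs, hA⟩ := ih (by omega)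
    have hn : n < lista.length := by omega
    have hv : PySem.List.pyGetD lista ((n : Nat) : Int) 0 = lista[n] := by
      rw [PySem.List.pyGetD_natCast]
      exact List.getD_eq_getElem lista 0 hn
    simp only [List.range_succ, List.foldl_append, List.foldl_cons, List.foldl_nil, hA, hB]
    by_cases h01 : 0 ≤ lista[n] ∧ lista[n] ≤ 10
    · by_cases hup : ((n : Int) - (cs : Int) + 1 > (bl : Int))
      · refine ⟨cs, n + 1 - cs, cs, ?_, by omega, by omega, ?_⟩
        · simp only [pvStepB, hv, h01, hup, if_pos, and_self]
          refine Prod.ext rfl (Prod.ext ?_ rfl); push_cast; omega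
        · have hAcond : ((n : Int) - (cs : Int) + 1 > if bl = 0 then (-1 : Int) else (bl : Int)) := by
            split_ifs <;> omega
          simp only [pvStepA, hv, h01, and_self, hAcond, if_pos]
          rw [pvTake_drop_succ lista cs n hcs hn]
          refine Prod.ext rfl (Prod.ext rfl (Prod.ext ?_ ?_))
          · push_cast; omega
          · have hne : n + 1 - cs ≠ 0 := by omega
            simp only [hne, if_false]
            omega
      · refine ⟨bs, bl, cs, ?_, by omega, by omega, ?_⟩
        · simp only [pvStepB, hv, h01, and_self, if_true, hup, if_false]
        · have hAcond : ¬ ((n : Int) - (cs : Int) + 1 > if bl = 0 then (-1 : Int) else (bl : Int)) := by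
            split_ifs with hb
            · exfalso; omega
            · omega
          simp only [pvStepA, hv, h01, and_self, if_true, hAcond, if_false]
          rw [pvTake_drop_succ lista cs n hcs hn]
          refine Prod.ext rfl (Prod.ext rfl (Prod.ext ?_ rfl))
          push_cast; omega
    · refine ⟨bs, bl, n + 1, ?_, by omega, by omega, ?_⟩
      · simp only [pvStepB, hv, h01, if_false]
        refine Prod.ext rfl (Prod.ext rfl ?_)
        push_cast; omega
      · simp only [pvStepA, hv, h01, if_false]
        refine Prod.ext rfl (Prod.ext ?_ (Prod.ext ?_ rfl))
        · simp
        · push_cast; omega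

-- ===== VERDICT (by name: the statement is the Claim_ definition above) =====
theorem secventa_maxima_interval_0_10_spec : Claim_equal_secventa_maxima_interval_0_10 := by
  intro lista d _dom hpre
  unfold Spec_secventa_maxima_interval_0_10
  unfold secventa_maxima_interval_0_10 secventa_maxima_interval_0_10_alt
  have hr : PySem.List.pyRange 0 d 1 = (List.range d.toNat).map (fun k => ((k : Nat) : Int)) := by
    rw [PySem.List.pyRange_one]
    simp
  rw [hr, List.foldl_map, List.foldl_map]
  have hlen : d.toNat ≤ lista.length := by
    unfold Pre_secventa_maxima_interval_0_10 at hpre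
    omega
  obtain ⟨bs, bl, cs, hB, hbnd, hcs, hA⟩ := pvLoop_inv lista d.toNat hlen
  simp only [hA, hB]
  rw [PySem.List.slice_natCast_add]
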